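-- pv_equiv track=rewrite | github.com/liuhuipy/Algorithm-python | test/chiZhuan.py | ChiZhuanLen
-- ===== SOURCE A (Python) =====
-- def ChiZhuanLen(m):
--     i, k = 0, 0
--     while i < len(m) - 1:
--         if m[i] == m[i+1]:
--             i += 1
--             k += 1
--         i += 1
--     return k
-- ===== SOURCE B (Python) =====
-- def ChiZhuanLen(m):
--     # one pass over run lengths: each maximal run of equal elements contributes run // 2
--     if not m:
--         return 0
--     total, run, prev = 0, 1, m[0]
--     for x in m[1:]:
--         if x == prev:
--             run += 1
--         else:
--             total += run // 2
--             run = 1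
--         prev = x
--     return total + run // 2
-- ===== Notes on version B (the rewrite author's own statement) =====
-- stated objective: alternative
-- what changed: Replaces A's index skip-scan (jumping two positions after a matched pair) by a single run-length pass that sums floor(run/2) over maximal runs of equal elements.
import Mathlib
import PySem

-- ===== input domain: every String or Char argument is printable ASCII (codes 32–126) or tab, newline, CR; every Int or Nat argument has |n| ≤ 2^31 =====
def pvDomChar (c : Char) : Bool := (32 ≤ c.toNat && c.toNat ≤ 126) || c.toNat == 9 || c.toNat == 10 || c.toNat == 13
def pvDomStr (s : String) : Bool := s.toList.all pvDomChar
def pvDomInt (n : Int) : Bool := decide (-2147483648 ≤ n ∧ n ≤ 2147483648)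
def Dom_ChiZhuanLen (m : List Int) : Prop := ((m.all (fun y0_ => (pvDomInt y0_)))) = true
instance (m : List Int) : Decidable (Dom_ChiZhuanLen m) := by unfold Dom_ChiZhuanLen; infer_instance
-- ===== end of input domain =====

-- B replaces A's index skip-scan by a single run-length pass summing floor(run/2) per maximal run (alternative decomposition, same cost).

-- ===== PORT A =====
-- A's while loop: i advances by 2 on a matched pair (counting it), else by 1.
def chiGoA (m : List Int) (i k : Int) : Int :=
  if _h : i < (m.length : Int) - 1 then
    if PySem.List.pyGet? m i = PySem.List.pyGet? m (i + 1) then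
      chiGoA m (i + 2) (k + 1)
    else
      chiGoA m (i + 1) k
  else k
termination_by ((m.length : Int) + 1 - i).toNat
decreasing_by all_goals omega

def ChiZhuanLen (m : List Int) : Int := chiGoA m 0 0

-- ===== PORT B =====
-- Source B's for-loop over m[1:], carrying (prev, run, total).
def chiGoB (prev run total : Int) : List Int → Int
  | [] => total + PySem.Int.floordiv run 2
  | x :: xs =>
    if x = prev then chiGoB x (run + 1) total xs
    else chiGoB x 1 (total + PySem.Int.floordiv run 2) xs

def ChiZhuanLen_alt (m : List Int) : Int :=
  match m with
  | [] => 0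
  | x :: xs => chiGoB x 1 0 xs

-- ===== PRECONDITION & SPEC =====
def Spec_ChiZhuanLen (m : List Int) (out : Int) : Prop := out = ChiZhuanLen_alt m
instance (m : List Int) (out : Int) : Decidable (Spec_ChiZhuanLen m out) := by unfold Spec_ChiZhuanLen; infer_instance

-- ===== CLAIM (what is proved, stated in full; the proofs are below) =====
def Claim_equal_ChiZhuanLen : Prop := ∀ (m : List Int), Dom_ChiZhuanLen m → Spec_ChiZhuanLen m (ChiZhuanLen m)

-- ===== LEMMAS AND PROOFS =====

-- reference function: the count of non-overlapping adjacent equal pairs, structurally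
def pairCount : List Int → Int
  | x :: y :: rest => if x = y then 1 + pairCount rest else pairCount (y :: rest)
  | _ => 0

theorem pairCount_replicate (n : Nat) (p : Int) :
    pairCount (List.replicate n p) = ((n / 2 : Nat) : Int) := by
  match n with
  | 0 => simp [pairCount]
  | 1 => simp [pairCount, List.replicate]
  | Nat.succ (Nat.succ n) =>
    have ih := pairCount_replicate n p
    simp [List.replicate, pairCount, ih]
    omega

theorem pairCount_replicate_append (n : Nat) (p x : Int) (xs : List Int) (hx : x ≠ p) :
    pairCount (List.replicate n p ++ x :: xs) = ((n / 2 : Nat) : Int) + pairCount (x :: xs) := by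
  match n with
  | 0 => simp
  | 1 =>
    simp only [List.replicate, List.cons_append, List.nil_append]
    rw [show pairCount (p :: x :: xs) = if p = x then 1 + pairCount xs else pairCount (x :: xs) from rfl]
    rw [if_neg (fun h => hx h.symm)]
    simp
  | Nat.succ (Nat.succ n) =>
    have ih := pairCount_replicate_append n p x xs hx
    simp only [List.replicate, List.cons_append, pairCount, ih]
    push_cast
    omega

theorem goB_eq (xs : List Int) : ∀ (prev total : Int) (r : Nat), 1 ≤ r →
    chiGoB prev (r : Int) total xs = total + pairCount (List.replicate r prev ++ xs) := by
  induction xs with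
  | nil =>
    intro prev total r _
    simp [chiGoB, List.append_nil, pairCount_replicate]
  | cons x xs ih =>
    intro prev total r hr
    by_cases hx : x = prev
    · subst hx
      have h1 : chiGoB x ((r : Int) + 1) total xs = total + pairCount (List.replicate (r + 1) x ++ xs) := by
        have := ih x total (r + 1) (by omega)
        exact_mod_cast this
      have h2 : List.replicate r x ++ x :: xs = List.replicate (r + 1) x ++ xs := by
        rw [List.replicate_succ', List.append_assoc]
        rfl
      simp [chiGoB, h1, h2]
    · have h1 := ih x (total + PySem.Int.floordiv (r : Int) 2) 1 le_rfl
      simp only [chiGoB, if_neg hx, Nat.cast_one] at h1 ⊢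
      rw [h1, pairCount_replicate_append r prev x xs hx]
      simp
      ring

theorem alt_eq_pairCount (m : List Int) : ChiZhuanLen_alt m = pairCount m := by
  match m with
  | [] => rfl
  | x :: xs =>
    have h := goB_eq xs x 0 1 le_rfl
    simpa [ChiZhuanLen_alt, List.replicate] using h

theorem goA_eq (t : List Int) : ∀ (m : List Int) (i : Nat) (k : Int), m.drop i = t →
    chiGoA m (i : Int) k = k + pairCount t := by
  match t with
  | [] =>
    intro m i k h
    have hl : m.length - i = 0 := by
      have := congrArg List.length h; simpa using this
    rw [chiGoA, dif_neg (by omega)]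
    simp [show pairCount [] = 0 from rfl]
  | [x] =>
    intro m i k h
    have hl : m.length - i = 1 := by
      have := congrArg List.length h; simpa using this
    rw [chiGoA, dif_neg (by omega)]
    simp [show pairCount [x] = 0 from rfl]
  | x :: y :: rest =>
    intro m i k h
    have hl : m.length - i = rest.length + 2 := by
      have := congrArg List.length h; simp at this; omega
    have hgi : m[i]? = some x := by
      have : (m.drop i)[0]? = m[i + 0]? := List.getElem?_drop
      simp [h] at this; simpa using this.symm
    have hgi1 : m[i + 1]? = some y := by
      have : (m.drop i)[1]? = m[i + 1]? := List.getElem?_drop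
      simp [h] at this; exact this.symm
    rw [chiGoA, dif_pos (by omega)]
    rw [PySem.List.pyGet?_natCast]
    have hcast : (i : Int) + 1 = ((i + 1 : Nat) : Int) := by push_cast; ring
    rw [hcast, PySem.List.pyGet?_natCast, hgi, hgi1]
    by_cases hxy : x = y
    · rw [if_pos (by rw [hxy])]
      have hdrop : m.drop (i + 2) = rest := by
        have : m.drop (i + 2) = (m.drop i).drop 2 := by
          rw [List.drop_drop]
        rw [this, h]; rfl
      have hrec := goA_eq rest m (i + 2) (k + 1) hdrop
      have hcast2 : (i : Int) + 2 = ((i + 2 : Nat) : Int) := by push_cast; ring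
      have hp : pairCount (x :: y :: rest) = 1 + pairCount rest := by
        simp [pairCount, hxy]
      rw [hcast2, hrec, hp]
      ring
    · rw [if_neg (by simpa using hxy)]
      have hdrop : m.drop (i + 1) = y :: rest := by
        have : m.drop (i + 1) = (m.drop i).drop 1 := by
          rw [List.drop_drop]
        rw [this, h]; rfl
      have hrec := goA_eq (y :: rest) m (i + 1) k hdrop
      have hp : pairCount (x :: y :: rest) = pairCount (y :: rest) := by
        simp [pairCount, hxy]
      rw [hp]
      exact hrec

theorem a_eq_pairCount (m : List Int) : ChiZhuanLen m = pairCount m := by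
  have h := goA_eq m m 0 0 (by simp)
  simpa [ChiZhuanLen] using h

-- ===== VERDICT (by name: the statement is the Claim_ definition above) =====
theorem ChiZhuanLen_spec : Claim_equal_ChiZhuanLen := by
  intro m _
  unfold Spec_ChiZhuanLen
  rw [a_eq_pairCount, alt_eq_pairCount]
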